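-- pv_equiv track=rewrite | github.com/Chukwudebelu/HackerRank | Mathematics/Algebra/Tell_the_Average/TellTheAverage0.py | value_of_S_recursive
-- ===== SOURCE A (Python) =====
-- def value_of_S_recursive(L: list) -> int:
--     n = len(L)
--     if (n == 0):    # empty list: L = []
--         return 0
--     elif (n == 1):  # unary list: L = [a]
--         return L[0]
--     else:           # other lists: L = [a, b, ...]
--         a = L[0]
--         b = L[1]
--         del L[1]    # L.pop(1) or L.remove(L[1])
--         L[0] = (a + b + a*b) % (10**9 + 7)
--         return value_of_S_recursive(L)
-- ===== SOURCE B (Python) =====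
-- def value_of_S_recursive(L: list) -> int:
--     # Equivalence is about the return value only: A empties L down to one
--     # element in place; B does not mutate L.
--     if not L:
--         return 0
--     if len(L) == 1:
--         return L[0]
--     p = 10**9 + 7
--     acc = 1
--     for x in L:
--         acc = acc * (x + 1) % p
--     return (acc - 1) % p
-- ===== Notes on version B (the rewrite author's own statement) =====
-- stated objective: faster
-- what changed: Replaced the quadratic recursion that repeatedly deletes from the list with a single pass accumulating the product of (x+1) mod p, using (a+b+ab) = (1+a)(1+b)-1.
import Mathlib
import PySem

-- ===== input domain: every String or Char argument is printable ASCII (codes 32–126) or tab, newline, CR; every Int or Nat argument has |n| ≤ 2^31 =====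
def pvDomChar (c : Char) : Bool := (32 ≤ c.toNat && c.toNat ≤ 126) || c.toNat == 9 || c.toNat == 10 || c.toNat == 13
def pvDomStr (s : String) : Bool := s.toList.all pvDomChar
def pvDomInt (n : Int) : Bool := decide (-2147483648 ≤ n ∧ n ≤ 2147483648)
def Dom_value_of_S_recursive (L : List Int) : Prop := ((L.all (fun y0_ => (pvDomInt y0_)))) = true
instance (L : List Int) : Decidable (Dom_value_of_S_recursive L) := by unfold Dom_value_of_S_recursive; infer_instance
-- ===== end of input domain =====

-- B replaces A's quadratic delete-and-recurse with one pass accumulating the product of (x+1) mod p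
-- (since a+b+ab = (1+a)(1+b)-1); equivalence is about the return value only (A empties L in place, B does not mutate).

-- ===== PORT A =====
def value_of_S_recursive : List Int → Int
  | [] => 0                       -- n == 0
  | [a] => a                      -- n == 1
  | a :: b :: rest =>             -- del L[1]; L[0] = (a+b+a*b) % (10**9+7); recurse
      value_of_S_recursive (PySem.Int.mod (a + b + a * b) (10 ^ 9 + 7) :: rest)
termination_by L => L.length
decreasing_by simp

-- ===== PORT B =====
def value_of_S_recursive_alt (L : List Int) : Int :=
  match L with
  | [] => 0
  | [a] => a
  | _ =>
      PySem.Int.mod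
        (L.foldl (fun acc x => PySem.Int.mod (acc * (x + 1)) (10 ^ 9 + 7)) 1 - 1)
        (10 ^ 9 + 7)

-- ===== PRECONDITION & SPEC =====
def Spec_value_of_S_recursive (L : List Int) (out : Int) : Prop := out = value_of_S_recursive_alt L
instance (L : List Int) (out : Int) : Decidable (Spec_value_of_S_recursive L out) := by unfold Spec_value_of_S_recursive; infer_instance

-- ===== CLAIM (what is proved, stated in full; the proofs are below) =====
def Claim_equal_value_of_S_recursive : Prop := ∀ (L : List Int), Dom_value_of_S_recursive L → Spec_value_of_S_recursive L (value_of_S_recursive L)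

-- ===== LEMMAS AND PROOFS =====

-- product of (x+1) over the list
def pvProdP (L : List Int) : Int := (L.map (· + 1)).prod

theorem pvMod_eq (x : Int) :
    PySem.Int.mod x (10 ^ 9 + 7) = x % (10 ^ 9 + 7) :=
  PySem.Int.mod_eq_emod_of_pos (by norm_num)

-- B's loop computes the product mod p (for a nonempty list)
theorem pvFoldl_eq (xs : List Int) (a : Int) (h : xs ≠ []) :
    xs.foldl (fun acc x => PySem.Int.mod (acc * (x + 1)) (10 ^ 9 + 7)) a
      = (a * pvProdP xs) % (10 ^ 9 + 7) := by
  induction xs generalizing a with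
  | nil => exact absurd rfl h
  | cons x xs ih =>
      cases xs with
      | nil => simp [pvProdP]
      | cons y ys =>
          rw [List.foldl_cons, ih _ (by simp), pvMod_eq,
            Int.mul_emod, Int.emod_emod_of_dvd _ dvd_rfl, ← Int.mul_emod]
          simp only [pvProdP, List.map_cons, List.prod_cons]
          congr 1
          ring

-- A's recursion computes (product of (x+1)) - 1 mod p (for lists of length ≥ 2)
theorem pvA_eq (rest : List Int) (a b : Int) :
    value_of_S_recursive (a :: b :: rest)
      = (pvProdP (a :: b :: rest) - 1) % (10 ^ 9 + 7) := by
  induction rest generalizing a b with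
  | nil =>
      rw [value_of_S_recursive, value_of_S_recursive, pvMod_eq]
      simp only [pvProdP, List.map_cons, List.map_nil, List.prod_cons, List.prod_nil]
      congr 1
      ring
  | cons c rest ih =>
      rw [value_of_S_recursive, ih]
      have h1 : (PySem.Int.mod (a + b + a * b) (10 ^ 9 + 7) + 1)
          ≡ (a + 1) * (b + 1) [ZMOD (10 ^ 9 + 7)] := by
        rw [pvMod_eq]
        calc (a + b + a * b) % (10 ^ 9 + 7) + 1
            ≡ (a + b + a * b) + 1 [ZMOD (10 ^ 9 + 7)] :=
              Int.ModEq.add_right 1 (Int.emod_emod_of_dvd _ dvd_rfl)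
          _ = (a + 1) * (b + 1) := by ring
      have h2 : pvProdP (PySem.Int.mod (a + b + a * b) (10 ^ 9 + 7) :: c :: rest) - 1
          ≡ pvProdP (a :: b :: c :: rest) - 1 [ZMOD (10 ^ 9 + 7)] := by
        apply Int.ModEq.sub_right
        simp only [pvProdP, List.map_cons, List.prod_cons, ← mul_assoc]
        exact Int.ModEq.mul (h1.mul_right _) Int.ModEq.rfl
      exact h2

-- ===== VERDICT (by name: the statement is the Claim_ definition above) =====
theorem value_of_S_recursive_spec : Claim_equal_value_of_S_recursive := by
  unfold Claim_equal_value_of_S_recursive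
  intro L _
  unfold Spec_value_of_S_recursive
  match L with
  | [] => rw [value_of_S_recursive]; rfl
  | [a] => rw [value_of_S_recursive]; rfl
  | a :: b :: rest =>
      have halt : value_of_S_recursive_alt (a :: b :: rest)
          = PySem.Int.mod
              ((a :: b :: rest).foldl
                (fun acc x => PySem.Int.mod (acc * (x + 1)) (10 ^ 9 + 7)) 1 - 1)
              (10 ^ 9 + 7) := rfl
      rw [pvA_eq, halt, pvFoldl_eq _ _ (by simp), pvMod_eq, one_mul]
      omega
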